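-- pv_equiv track=rewrite | github.com/jeff8971/self_project | plate_name_primer_well/original/vlad_test2.py | to_plate
-- ===== SOURCE A (Python) =====
-- def primer_list(file_list: list) -> list:
--     '''
--     :function: analysis the directive_file.txt into a list with sublist
--     :parameter: .txt
--     :return all_primer_list
--     every sublist is 4 elements
--     [0] template: template name
--     [1] well: well number
--     [2] primer: primer name
--     [3] comment: email or order#
--     '''
--
--     all_primer_list = []
--     for i in range(1, len(file_list)):
--         reaction = file_list[i]
--         current_primers = reaction[2]
--         current_primers_list = current_primers.split(";")
--
--         for each in current_primers_list:
--             if each not in all_primer_list: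
--                 all_primer_list.append(each)
--
--     return all_primer_list
--
-- def well_primers_dict(file_list: list) -> dict:
--     '''
--
--     :param file_list: whole file list
--     :return: the dictionary, key is the sample name, value is the primer list
--     '''
--
--     well_primers_dict = {}
--     for i in range(1, len(file_list)):
--         cur_well = file_list[i][1]
--         cur_primer_list = file_list[i][2].split(";")
--         well_primers_dict[cur_well] = cur_primer_list
--
--     return well_primers_dict
--
-- def plate_well(file_list: list) -> list:
--     all_wells_num = []
--     for i in range(1, len(file_list)):
--         reaction = file_list[i]
--         sample = reaction[1]
--         all_wells_num.append(sample)
--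
--     return all_wells_num
--
-- def to_plate(file_list: list):
--     '''
--     :param file_list:
--     :return: the plate list [[well1, primer], [well2, primer], [well3,
--     primer]....]
--     '''
--
--     all_primers_l = primer_list(file_list)
--     all_well_l = plate_well(file_list)
--     well_primer_d = well_primers_dict(file_list)
--
--     plate_l = []
--
--     for i in range(len(all_primers_l)):
--         curr_primer = all_primers_l[i]
--
--         for j in range(len(all_well_l)):
--             curr_well = all_well_l[j]
--             curr_w_p_l = []
--
--             if curr_primer in well_primer_d[curr_well]:
--                 curr_w_p_l.append(curr_well)
--                 curr_w_p_l.append(curr_primer)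
--                 plate_l.append(curr_w_p_l)
--
--     return plate_l
-- ===== SOURCE B (Python) =====
-- def to_plate(file_list: list):
--     '''
--     :param file_list:
--     :return: the plate list [[well1, primer], [well2, primer], ...],
--     grouped by primer in order of first appearance
--     '''
--     primers_by_well = {}
--     wells_by_primer = {}
--     for row in file_list[1:]:
--         well, primers = row[1], row[2].split(";")
--         if primers_by_well.setdefault(well, primers) != primers:
--             raise ValueError("well %r listed with conflicting primers" % well)
--         for primer in dict.fromkeys(primers):
--             wells_by_primer.setdefault(primer, []).append(well)
--     return [[well, primer]
--             for primer, wells in wells_by_primer.items()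
--             for well in wells]
-- ===== Notes on version B (the rewrite author's own statement) =====
-- stated objective: alternative
-- what changed: Replaces A's three preparatory passes plus nested primers-by-wells membership scan with one pass that groups well occurrences into an inverted index primer -> wells and emits the pairs straight from the index items; Pre_ excludes rows shorter than 3 fields (A raises IndexError) and inputs where a well name recurs with a conflicting primer field - a duplicate-key corner where A silently applies the last row's primers to every occurrence and B instead rejects the conflict with ValueError.
-- outside the precondition, e.g. on to_plate([[], ['', '', 'q'], ['', '', '']]): A returns [['', ''], ['', '']], B raises ValueError
import Mathlib
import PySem

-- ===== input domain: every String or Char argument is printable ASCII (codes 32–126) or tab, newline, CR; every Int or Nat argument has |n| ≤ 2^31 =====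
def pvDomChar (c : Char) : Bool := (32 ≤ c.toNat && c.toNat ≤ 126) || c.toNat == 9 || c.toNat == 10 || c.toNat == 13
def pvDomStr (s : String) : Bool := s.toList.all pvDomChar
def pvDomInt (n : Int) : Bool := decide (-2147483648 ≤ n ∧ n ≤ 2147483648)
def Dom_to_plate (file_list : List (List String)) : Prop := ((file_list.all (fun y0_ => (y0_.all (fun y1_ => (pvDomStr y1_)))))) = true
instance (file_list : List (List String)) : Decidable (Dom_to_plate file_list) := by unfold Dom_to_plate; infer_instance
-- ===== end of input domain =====

-- B builds an inverted index primer -> well occurrences in one pass and emits the pairs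
-- from it, instead of A's three preparatory passes plus nested primers×wells membership scan.

-- row[1] / row[2] (in range on every input admitted by Pre_to_plate)
def pvWell (row : List String) : String := (PySem.List.pyGet? row 1).getD ""
def pvPrim (row : List String) : String := (PySem.List.pyGet? row 2).getD ""
-- s.split(";")
def pvSplit (s : String) : List String := (PySem.Str.split? s ";").getD []

-- ===== PORT A =====
def primer_list (file_list : List (List String)) : List String :=
  (file_list.drop 1).foldl (fun acc row =>
    (pvSplit (pvPrim row)).foldl
      (fun acc2 p => if p ∈ acc2 then acc2 else acc2 ++ [p]) acc) []

def well_primers_dict (file_list : List (List String)) : PySem.Dict String (List String) :=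
  (file_list.drop 1).foldl
    (fun d row => d.insert (pvWell row) (pvSplit (pvPrim row))) PySem.Dict.empty

def plate_well (file_list : List (List String)) : List String :=
  (file_list.drop 1).foldl (fun acc row => acc ++ [pvWell row]) []

def to_plate (file_list : List (List String)) : List (List String) :=
  let all_primers_l := primer_list file_list
  let all_well_l := plate_well file_list
  let well_primer_d := well_primers_dict file_list
  all_primers_l.foldl (fun plate_l p =>
    all_well_l.foldl (fun acc w =>
      if p ∈ well_primer_d.getD w [] then acc ++ [[w, p]] else acc) plate_l) []

-- ===== PORT B =====
-- The loop carries (primers_by_well, wells_by_primer) in an Option: none = the ValueError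
-- raised on a conflicting duplicate well (outside Pre_; the final match returns [] there,
-- where the Python has no value).
-- wells_by_primer.setdefault(primer, []).append(row[1])  =  modify primer [] (· ++ [well])
def to_plate_alt (file_list : List (List String)) : List (List String) :=
  let st := (PySem.List.slice file_list (some 1) none).foldl
    (fun (st : Option (PySem.Dict String (List String) × PySem.Dict String (List String))) row =>
      match st with
      | none => none
      | some (primers_by_well, wells_by_primer) =>
        if primers_by_well.getD (pvWell row) (pvSplit (pvPrim row)) ≠ pvSplit (pvPrim row)
        then none  -- raise ValueError
        else
          some (primers_by_well.setdefault (pvWell row) (pvSplit (pvPrim row)),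
                (PySem.List.dedup (pvSplit (pvPrim row))).foldl
                  (fun b2 primer => b2.modify primer [] (· ++ [pvWell row])) wells_by_primer))
    (some (PySem.Dict.empty, PySem.Dict.empty))
  match st with
  | none => []  -- unreachable inside Pre_: the Python raised
  | some (_, wells_by_primer) =>
      wells_by_primer.items.flatMap (fun pr => pr.2.map (fun well => [well, pr.1]))

-- ===== PRECONDITION & SPEC =====
-- Pre_ excludes (a) data rows with fewer than 3 fields, on which Python A raises IndexError,
-- and (b) inputs where a well name recurs with a conflicting primer field — a duplicate-key
-- corner: A's last-wins dict silently applies the LAST row's primers to every occurrence of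
-- that well, while B rejects the conflict with ValueError.
def Pre_to_plate (file_list : List (List String)) : Prop :=
  (∀ row ∈ file_list.drop 1, 3 ≤ row.length) ∧
  (∀ r1 ∈ file_list.drop 1, ∀ r2 ∈ file_list.drop 1,
      pvWell r1 = pvWell r2 → pvSplit (pvPrim r1) = pvSplit (pvPrim r2))
instance (file_list : List (List String)) : Decidable (Pre_to_plate file_list) := by
  unfold Pre_to_plate; infer_instance
def pvWitness_to_plate : List (List String) :=
  [["template", "well", "primers", "comment"], ["t1", "A1", "p1;p2", "c"], ["t2", "A2", "p2", "c"]]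

def Spec_to_plate (file_list : List (List String)) (out : List (List String)) : Prop := out = to_plate_alt file_list
instance (file_list : List (List String)) (out : List (List String)) : Decidable (Spec_to_plate file_list out) := by unfold Spec_to_plate; infer_instance

-- ===== CLAIM (what is proved, stated in full; the proofs are below) =====
def Claim_equal_to_plate : Prop := ∀ (file_list : List (List String)), Dom_to_plate file_list → Pre_to_plate file_list → Spec_to_plate file_list (to_plate file_list)

-- ===== LEMMAS AND PROOFS =====

-- 'if P x: out.append(f x)' fold, Prop-valued test
theorem pv_foldl_ite_append {α β : Type} (P : α → Prop) [DecidablePred P] (f : α → β)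
    (l : List α) (acc : List β) :
    l.foldl (fun a x => if P x then a ++ [f x] else a) acc
      = acc ++ (l.filter (fun x => decide (P x))).map f := by
  induction l generalizing acc with
  | nil => simp
  | cons x xs ih =>
    by_cases h : P x <;> simp [List.foldl_cons, ih, h]

theorem pv_foldl_flatMap {α β γ : Type} (g : α → List β) (f : γ → β → γ)
    (l : List α) (i : γ) :
    (l.flatMap g).foldl f i = l.foldl (fun a x => (g x).foldl f a) i := by
  induction l generalizing i with
  | nil => rfl
  | cons x xs ih => simp [List.flatMap_cons, List.foldl_append, ih]

-- A's append-if-absent loop is PySem.Set.add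
theorem pv_add_eq_step (a : List String) (x : String) :
    PySem.Set.add a x = if x ∈ a then a else a ++ [x] := by
  simp [PySem.Set.add, PySem.Set.contains]

-- A's primer dedup loop equals the ordered dedup of the concatenated primer fields
theorem pv_primers_eq (file_list : List (List String)) :
    primer_list file_list
      = PySem.List.dedup ((file_list.drop 1).flatMap (fun row => pvSplit (pvPrim row))) := by
  rw [PySem.List.dedup_eq_ofList, PySem.Set.ofList_eq_foldl, pv_foldl_flatMap]
  unfold primer_list
  refine PySem.List.foldl_congr_mem _ _ _ _ ?_
  intro acc row _
  refine PySem.List.foldl_congr_mem _ _ _ _ ?_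
  intro acc2 p _
  rw [pv_add_eq_step]

theorem pv_plate_well_eq (file_list : List (List String)) :
    plate_well file_list = (file_list.drop 1).map pvWell := by
  unfold plate_well
  rw [PySem.List.foldl_append_singleton_eq_map]
  simp

-- inner bucket loop: over a duplicate-free primer list, p's bucket gains w iff p occurs
theorem pv_inner_bucket (qs : List String) (w : String) (p : String)
    (b : PySem.Dict String (List String)) (hnd : qs.Nodup) :
    (qs.foldl (fun b2 q => b2.modify q [] (· ++ [w])) b).getD p []
      = b.getD p [] ++ (if p ∈ qs then [w] else []) := by
  induction qs generalizing b with
  | nil => simp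
  | cons q qs ih =>
    simp only [List.nodup_cons] at hnd
    rw [List.foldl_cons, ih _ hnd.2]
    by_cases h : p = q
    · subst h
      have hpq : p ∉ qs := hnd.1
      simp [hpq]
    · simp [PySem.Dict.getD_modify, h]

-- outer bucket loop: p's bucket is exactly the well occurrences whose row lists p
theorem pv_buckets_getD (rows : List (List String))
    (b : PySem.Dict String (List String)) (p : String) :
    ((rows.foldl (fun b row =>
        (PySem.List.dedup (pvSplit (pvPrim row))).foldl
          (fun b2 q => b2.modify q [] (· ++ [pvWell row])) b) b).getD p [])
      = b.getD p []
        ++ (rows.filter (fun row => decide (p ∈ pvSplit (pvPrim row)))).map pvWell := by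
  induction rows generalizing b with
  | nil => simp
  | cons r rs ih =>
    rw [List.foldl_cons, ih, pv_inner_bucket _ _ _ _ (PySem.List.nodup_dedup _),
        List.filter_cons]
    by_cases h : p ∈ pvSplit (pvPrim r) <;>
      simp [h]

-- Set.update distributes over an added element on the right
theorem pv_update_add (s t : List String) (x : String) :
    PySem.Set.update s (PySem.Set.add t x) = PySem.Set.add (PySem.Set.update s t) x := by
  by_cases h : x ∈ t
  · have h1 : PySem.Set.add t x = t := by simp [PySem.Set.add, PySem.Set.contains, h]
    have h2 : x ∈ PySem.Set.update s t := by simp [PySem.Set.mem_update, h]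
    rw [h1]
    simp [PySem.Set.add, PySem.Set.contains, h2]
  · have h1 : PySem.Set.add t x = t ++ [x] := by simp [PySem.Set.add, PySem.Set.contains, h]
    rw [h1]
    show (t ++ [x]).foldl PySem.Set.add s = _
    rw [List.foldl_append]
    rfl

-- updating with an already-deduplicated list is updating with the list itself
theorem pv_update_update (l : List String) (s t : List String) :
    PySem.Set.update s (PySem.Set.update t l) = PySem.Set.update (PySem.Set.update s t) l := by
  induction l generalizing t with
  | nil => rfl
  | cons x xs ih =>
    rw [PySem.Set.update_cons, PySem.Set.update_cons, ih, pv_update_add]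

theorem pv_update_dedup (s : List String) (l : List String) :
    PySem.Set.update s (PySem.List.dedup l) = PySem.Set.update s l := by
  have h : PySem.List.dedup l = PySem.Set.update [] l := by
    rw [PySem.List.dedup_eq_ofList, PySem.Set.ofList_eq_foldl]; rfl
  rw [h, pv_update_update]
  rfl

-- keys of the inverted index: the distinct primers in first-appearance order
theorem pv_buckets_keys (rows : List (List String)) (b : PySem.Dict String (List String)) :
    ((rows.foldl (fun b row =>
        (PySem.List.dedup (pvSplit (pvPrim row))).foldl
          (fun b2 q => b2.modify q [] (· ++ [pvWell row])) b) b).keys)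
      = PySem.Set.update b.keys (rows.flatMap (fun row => pvSplit (pvPrim row))) := by
  induction rows generalizing b with
  | nil => simp
  | cons r rs ih =>
    rw [List.foldl_cons, ih, PySem.Dict.keys_foldl_modify, pv_update_dedup,
        List.flatMap_cons, PySem.Set.update_append]

-- under Pre_'s consistency, the last-wins dict agrees with every row's own primer field
theorem pv_dict_getD (rows : List (List String))
    (hc : ∀ r1 ∈ rows, ∀ r2 ∈ rows, pvWell r1 = pvWell r2 → pvSplit (pvPrim r1) = pvSplit (pvPrim r2))
    (r : List String) (hr : r ∈ rows) :
    ((rows.foldl (fun d row => d.insert (pvWell row) (pvSplit (pvPrim row))) PySem.Dict.empty).getD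
        (pvWell r) [])
      = pvSplit (pvPrim r) := by
  induction rows using List.reverseRecOn with
  | nil => cases hr
  | append_singleton rs r0 ih =>
    rw [List.foldl_append, List.foldl_cons, List.foldl_nil, PySem.Dict.getD_insert]
    by_cases h : pvWell r = pvWell r0
    · rw [if_pos h]
      exact (hc r0 (by simp) r hr h.symm)
    · rw [if_neg h]
      have hrs : r ∈ rs := by
        rcases List.mem_append.mp hr with h' | h'
        · exact h'
        · simp at h'; subst h'; exact absurd rfl h
      exact ih (fun r1 h1 r2 h2 => hc r1 (by simp [h1]) r2 (by simp [h2])) hrs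

-- under Pre_'s consistency the conflict check never fires: the loop returns both dicts
theorem pv_loop_ok (rows : List (List String))
    (hc : ∀ r1 ∈ rows, ∀ r2 ∈ rows, pvWell r1 = pvWell r2 → pvSplit (pvPrim r1) = pvSplit (pvPrim r2))
    (pbw wbp : PySem.Dict String (List String))
    (hinv : ∀ r ∈ rows, ∀ v, pbw.get? (pvWell r) = some v → v = pvSplit (pvPrim r)) :
    rows.foldl (fun (st : Option (PySem.Dict String (List String) × PySem.Dict String (List String))) row =>
      match st with
      | none => none
      | some (primers_by_well, wells_by_primer) =>
        if primers_by_well.getD (pvWell row) (pvSplit (pvPrim row)) ≠ pvSplit (pvPrim row) then none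
        else
          some (primers_by_well.setdefault (pvWell row) (pvSplit (pvPrim row)),
                (PySem.List.dedup (pvSplit (pvPrim row))).foldl
                  (fun b2 primer => b2.modify primer [] (· ++ [pvWell row])) wells_by_primer))
      (some (pbw, wbp))
    = some (rows.foldl (fun d row => d.setdefault (pvWell row) (pvSplit (pvPrim row))) pbw,
            rows.foldl (fun b row => (PySem.List.dedup (pvSplit (pvPrim row))).foldl
              (fun b2 q => b2.modify q [] (· ++ [pvWell row])) b) wbp) := by
  induction rows generalizing pbw wbp with
  | nil => rfl
  | cons r rs ih =>
    have hpass : pbw.getD (pvWell r) (pvSplit (pvPrim r)) = pvSplit (pvPrim r) := by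
      cases hg : pbw.get? (pvWell r) with
      | none => rw [PySem.Dict.getD_eq_get?_getD, hg]; rfl
      | some v => rw [PySem.Dict.getD_eq_get?_getD, hg]; exact hinv r (by simp) v hg
    simp only [List.foldl_cons, hpass, ne_eq, not_true_eq_false, if_false]
    refine ih (fun r1 h1 r2 h2 h => hc r1 (by simp [h1]) r2 (by simp [h2]) h) _ _ ?_
    intro r2 h2 v hv
    by_cases h : pvWell r2 = pvWell r
    · rw [h, PySem.Dict.get?_setdefault_self] at hv
      have hsp : pvSplit (pvPrim r) = pvSplit (pvPrim r2) :=
        hc r (by simp) r2 (by simp [h2]) h.symm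
      cases hg : pbw.get? (pvWell r) with
      | none => rw [hg] at hv; simp at hv; rw [← hv, ← hsp]
      | some u =>
        rw [hg] at hv; simp at hv
        rw [← hv, hinv r (by simp) u hg, hsp]
    · rw [PySem.Dict.get?_setdefault_of_ne _ _ h] at hv
      exact hinv r2 (by simp [h2]) v hv

-- ===== VERDICT (by name: the statement is the Claim_ definition above) =====
theorem to_plate_spec : Claim_equal_to_plate := by
  intro file_list _ hpre
  unfold Spec_to_plate to_plate to_plate_alt
  rw [show (1:Int) = ((1:Nat):Int) from rfl, PySem.List.slice_from_natCast]
  set rows := file_list.drop 1 with hrows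
  dsimp only
  rw [pv_loop_ok rows (fun r1 h1 r2 h2 h => hpre.2 r1 h1 r2 h2 h) PySem.Dict.empty PySem.Dict.empty
        (by intro r _ v hv; simp [PySem.Dict.get?_empty] at hv)]
  dsimp only
  have hupd : PySem.Set.update ([] : List String)
      (rows.flatMap (fun row => pvSplit (pvPrim row)))
      = PySem.List.dedup (rows.flatMap (fun row => pvSplit (pvPrim row))) := by
    rw [PySem.List.dedup_eq_ofList, PySem.Set.ofList_eq_foldl]; rfl
  have hkeysnil : (PySem.Dict.empty : PySem.Dict String (List String)).keys = [] := by simp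
  -- B: items of the inverted index, as a map over the distinct primers
  have hnodupkeys :
      ((rows.foldl (fun b row =>
          (PySem.List.dedup (pvSplit (pvPrim row))).foldl
            (fun b2 q => b2.modify q [] (· ++ [pvWell row])) b) PySem.Dict.empty).keys).Nodup := by
    rw [pv_buckets_keys, hkeysnil, hupd]
    exact PySem.List.nodup_dedup _
  rw [PySem.Dict.items_eq_map_keys _ hnodupkeys ([] : List String), pv_buckets_keys,
      List.flatMap_map]

  -- A: normalise the nested loops to flatMap-of-filter form
  have hA : ∀ (d : PySem.Dict String (List String)) (ps ws : List String),
      ps.foldl (fun plate_l p =>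
        ws.foldl (fun acc w =>
          if p ∈ d.getD w [] then acc ++ [[w, p]] else acc) plate_l) []
        = ps.flatMap (fun p =>
            (ws.filter (fun w => decide (p ∈ d.getD w []))).map (fun w => [w, p])) := by
    intro d ps ws
    have h1 : ps.foldl (fun plate_l p =>
        ws.foldl (fun acc w =>
          if p ∈ d.getD w [] then acc ++ [[w, p]] else acc) plate_l) []
        = ps.foldl (fun plate_l p =>
            plate_l ++ (ws.filter (fun w => decide (p ∈ d.getD w []))).map (fun w => [w, p])) [] := by
      refine PySem.List.foldl_congr_mem _ _ _ _ ?_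
      intro acc p _
      exact pv_foldl_ite_append (fun w => p ∈ d.getD w []) (fun w => [w, p]) ws acc
    rw [h1, PySem.List.foldl_append_eq_flatMap]
    simp
  rw [hA, pv_primers_eq, pv_plate_well_eq, ← hrows]
  rw [hkeysnil, hupd]
  apply List.flatMap_congr
  intro p _
  rw [pv_buckets_getD]
  simp only [PySem.Dict.getD_empty, List.nil_append]
  rw [List.filter_map, List.map_map, List.map_map]
  apply congrArg
  apply List.filter_congr
  intro r hr
  have hd := pv_dict_getD rows (fun r1 h1 r2 h2 => (hpre.2 r1 h1 r2 h2)) r hr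
  unfold well_primers_dict
  rw [← hrows, Function.comp_apply, hd]
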